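-- pv_equiv track=rewrite | github.com/AndreyMeshkov/codewars-python | 6kyu/Numericals of a String.py | numericals
-- ===== SOURCE A (Python) =====
-- def numericals(s):
--     result = ""
--     dict = {}
--     for i in range(len(s)):
--         if s[i] in dict.keys():
--             dict[s[i]] += 1
--         else:
--             dict[s[i]] = 1
--         result += str(dict[s[i]])
--     return result
-- ===== SOURCE B (Python) =====
-- def numericals(s):
--     return ''.join(str(s[:i + 1].count(c)) for i, c in enumerate(s))
-- ===== Notes on version B (the rewrite author's own statement) =====
-- stated objective: idiomatic
-- what changed: Replaces the incremental dict of running counts (with its if/else branch and string accumulator) by a stateless one-liner that, for each position, counts the character's occurrences in the prefix slice s[:i+1] and joins the counts.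
import Mathlib
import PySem

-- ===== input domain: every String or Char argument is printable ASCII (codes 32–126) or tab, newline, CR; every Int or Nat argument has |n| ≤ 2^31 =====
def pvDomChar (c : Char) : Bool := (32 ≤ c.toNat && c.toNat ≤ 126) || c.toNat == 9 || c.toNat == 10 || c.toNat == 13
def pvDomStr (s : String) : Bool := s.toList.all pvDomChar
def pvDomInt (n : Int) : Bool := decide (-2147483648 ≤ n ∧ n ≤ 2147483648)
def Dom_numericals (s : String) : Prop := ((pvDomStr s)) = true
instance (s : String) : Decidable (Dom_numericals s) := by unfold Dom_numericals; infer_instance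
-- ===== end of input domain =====

-- B replaces A's running-count dict and if/else branch by a stateless join of prefix-slice counts (idiomatic; not faster).

-- ===== PORT A =====
def numericals (s : String) : String :=
  let cs := s.toList
  let r := (PySem.List.pyRange 0 (PySem.List.len cs) 1).foldl
    (fun (st : List Char × PySem.Dict Char Int) i =>
      let c := PySem.List.pyGetD cs i ' '
      let d := if st.2.contains c then st.2.insert c (st.2.getD c 0 + 1)
               else st.2.insert c 1
      (st.1 ++ PySem.Int.toChars (d.getD c 0), d))
    ([], PySem.Dict.empty)
  String.ofList r.1

-- ===== PORT B =====
def numericals_alt (s : String) : String :=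
  let cs := s.toList
  String.ofList (PySem.Chars.join [] ((PySem.List.enumerate cs 0).map (fun p =>
    PySem.Int.toChars (((PySem.List.slice cs none (some (p.1 + 1))).count p.2 : Int)))))

-- ===== PRECONDITION & SPEC =====
def Spec_numericals (s : String) (out : String) : Prop := out = numericals_alt s
instance (s : String) (out : String) : Decidable (Spec_numericals s out) := by unfold Spec_numericals; infer_instance

-- ===== CLAIM (what is proved, stated in full; the proofs are below) =====
def Claim_equal_numericals : Prop := ∀ (s : String), Dom_numericals s → Spec_numericals s (numericals s)

-- ===== LEMMAS AND PROOFS =====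

-- A's loop body, after the range/index fold has been turned into a fold over the characters.
def pvStep (st : List Char × PySem.Dict Char Int) (c : Char) : List Char × PySem.Dict Char Int :=
  let d := if st.2.contains c then st.2.insert c (st.2.getD c 0 + 1)
           else st.2.insert c 1
  (st.1 ++ PySem.Int.toChars (d.getD c 0), d)

theorem pvJoinNil_flatten (xs : List (List Char)) : PySem.Chars.join [] xs = xs.flatten := by
  induction xs with
  | nil => rfl
  | cons a t ih =>
    cases t with
    | nil => simp [PySem.Chars.join, List.intercalate]
    | cons b r => rw [PySem.Chars.join_cons_cons]; simp_all

-- Loop invariant: with the dict holding the counts of the processed prefix, the rest of A's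
-- fold produces exactly B's joined prefix-slice counts for the remaining characters.
theorem pvMain (l : List Char) : ∀ (pref : List Char) (d : PySem.Dict Char Int) (res : List Char),
    (∀ c, d.getD c 0 = (pref.count c : Int)) →
    (l.foldl pvStep (res, d)).1 =
    res ++ PySem.Chars.join [] ((PySem.List.enumerate l (pref.length : Int)).map (fun p =>
      PySem.Int.toChars (((PySem.List.slice (pref ++ l) none (some (p.1 + 1))).count p.2 : Int)))) := by
  induction l with
  | nil => intro pref d res hd; simp [PySem.List.enumerate_nil]
  | cons c l ih =>
    intro pref d res hd
    have hd' : (if d.contains c then d.insert c (d.getD c 0 + 1) else d.insert c 1)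
        = d.insert c ((pref.count c : Int) + 1) := by
      by_cases hc : d.contains c
      · simp [hc, hd c]
      · have h0 : d.getD c 0 = 0 :=
          PySem.Dict.getD_of_not_contains d 0 (by simpa using hc)
        have hz : (pref.count c : Int) = 0 := by rw [← hd c, h0]
        simp [hc, hz]
    have hinv : ∀ c', (d.insert c ((pref.count c : Int) + 1)).getD c' 0
        = ((pref ++ [c]).count c' : Int) := by
      intro c'
      rw [PySem.Dict.getD_insert]
      by_cases h : c' = c
      · subst h; simp
      · have h2 : c ≠ c' := fun hh => h hh.symm
        simp [h, h2, hd c', List.count_append]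
    have hstep : pvStep (res, d) c
        = (res ++ PySem.Int.toChars ((pref.count c : Int) + 1),
           d.insert c ((pref.count c : Int) + 1)) := by
      simp only [pvStep, hd']
      rw [PySem.Dict.getD_insert]
      simp
    have hslice : PySem.List.slice (pref ++ c :: l) none (some ((pref.length : Int) + 1))
        = pref ++ [c] := by
      rw [PySem.List.slice_to (pref ++ c :: l) (by omega)]
      have h1 : ((pref.length : Int) + 1).toNat = pref.length + 1 := by omega
      rw [h1, List.take_append]
      simp
    have hcount : (((pref ++ [c]).count c : Int)) = (pref.count c : Int) + 1 := by
      simp [List.count_append]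
    rw [List.foldl_cons, hstep, ih (pref ++ [c]) _ _ hinv]
    simp only [pvJoinNil_flatten, PySem.List.enumerate_cons, List.map_cons, List.flatten_cons]
    simp [hslice, List.append_assoc]

-- ===== VERDICT (by name: the statement is the Claim_ definition above) =====
theorem numericals_spec : Claim_equal_numericals := by
  unfold Claim_equal_numericals Spec_numericals
  intro s _
  show String.ofList (((PySem.List.pyRange 0 (PySem.List.len s.toList) 1).foldl
      (fun acc j => pvStep acc (PySem.List.pyGetD s.toList j ' ')) ([], PySem.Dict.empty)).1)
      = numericals_alt s
  rw [PySem.List.foldl_pyRange_pyGetD s.toList ' ' pvStep ([], PySem.Dict.empty) (le_refl 0)]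
  have h := pvMain s.toList [] PySem.Dict.empty [] (by intro c; simp [PySem.Dict.getD_empty])
  simp only [List.nil_append, List.length_nil, Nat.cast_zero] at h
  simp only [Int.toNat_zero, List.drop_zero, h]
  simp [numericals_alt]
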